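-- pv_equiv track=rewrite | github.com/meghanasrividya/Eng130_OOP | python_practise_code/odd_even_counter.py | odd_even_counter
-- ===== SOURCE A (Python) =====
-- def odd_even_counter(number):
--    list_1=[0,0]
--
--    while (number != 0) :
--        if(number%2==0):
--           list_1[0]=list_1[0]+number
--        else:
--             list_1[1]=list_1[1] + number
--
--        number-=1
--    return list_1
-- ===== SOURCE B (Python) =====
-- def odd_even_counter(number):
--     m = number // 2
--     return [m * (m + 1), (number - m) ** 2]
-- ===== Notes on version B (the rewrite author's own statement) =====
-- stated objective: faster
-- what changed: Replaces the decrement-to-zero while loop with closed-form arithmetic-series formulas: even sum = m*(m+1) and odd sum = (number-m)^2 where m = number//2.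
import Mathlib
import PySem

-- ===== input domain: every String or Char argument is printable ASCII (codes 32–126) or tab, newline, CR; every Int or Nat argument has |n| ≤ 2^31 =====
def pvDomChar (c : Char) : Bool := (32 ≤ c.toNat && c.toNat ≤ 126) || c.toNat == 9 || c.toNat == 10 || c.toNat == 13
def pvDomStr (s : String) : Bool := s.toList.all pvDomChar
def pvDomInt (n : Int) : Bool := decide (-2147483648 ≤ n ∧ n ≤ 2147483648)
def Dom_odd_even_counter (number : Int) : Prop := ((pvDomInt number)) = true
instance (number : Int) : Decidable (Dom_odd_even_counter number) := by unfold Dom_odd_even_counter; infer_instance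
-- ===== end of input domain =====

-- B replaces A's decrement-to-zero loop by closed-form arithmetic-series formulas (objective: faster, O(1) vs O(n)).

-- ===== PORT A =====
-- while (number != 0): accumulate into list_1[0]/list_1[1]; fuel = number.toNat (exact for number ≥ 0;
-- for number < 0 the Python loop never terminates, which Pre_ excludes).
def oec_loop : Nat → Int → Int → Int → List Int
  | 0, _, l0, l1 => [l0, l1]
  | fuel+1, n, l0, l1 =>
    if n ≠ 0 then
      if PySem.Int.mod n 2 = 0 then oec_loop fuel (n - 1) (l0 + n) l1
      else oec_loop fuel (n - 1) l0 (l1 + n)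
    else [l0, l1]

def odd_even_counter (number : Int) : List Int :=
  oec_loop number.toNat number 0 0

-- ===== PORT B =====
def odd_even_counter_alt (number : Int) : List Int :=
  let m := PySem.Int.floordiv number 2
  [m * (m + 1), (number - m) ^ 2]

-- ===== PRECONDITION & SPEC =====
-- Pre_ excludes number < 0: there A's while loop never terminates (no value is returned).
def Pre_odd_even_counter (number : Int) : Prop := 0 ≤ number
instance (number : Int) : Decidable (Pre_odd_even_counter number) := by unfold Pre_odd_even_counter; infer_instance
def pvWitness_odd_even_counter : Int := (7)

def Spec_odd_even_counter (number : Int) (out : List Int) : Prop := out = odd_even_counter_alt number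
instance (number : Int) (out : List Int) : Decidable (Spec_odd_even_counter number out) := by unfold Spec_odd_even_counter; infer_instance

-- ===== CLAIM (what is proved, stated in full; the proofs are below) =====
def Claim_equal_odd_even_counter : Prop := ∀ (number : Int), Dom_odd_even_counter number → Pre_odd_even_counter number → Spec_odd_even_counter number (odd_even_counter number)

-- ===== LEMMAS AND PROOFS =====

-- The loop invariant: run from k with fuel k, the accumulators gain the even/odd series sums.
theorem oec_loop_eq (k : Nat) : ∀ (l0 l1 : Int),
    oec_loop k (k : Int) l0 l1 =
      [l0 + ((k / 2 : Nat) : Int) * (((k / 2 : Nat) : Int) + 1),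
       l1 + (((k - k / 2 : Nat) : Int)) ^ 2] := by
  induction k with
  | zero => intro l0 l1; simp [oec_loop]
  | succ k ih =>
    intro l0 l1
    have hne : ((k + 1 : Nat) : Int) ≠ 0 := by exact_mod_cast Nat.succ_ne_zero k
    have hmod : PySem.Int.mod ((k + 1 : Nat) : Int) 2 = (((k + 1) % 2 : Nat) : Int) := by
      exact_mod_cast PySem.Int.mod_natCast (k + 1) 2
    have hsub : ((k + 1 : Nat) : Int) - 1 = (k : Int) := by push_cast; ring
    rcases Nat.even_or_odd (k + 1) with he | ho
    · obtain ⟨b, hb⟩ := he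
      have hm : (k + 1) % 2 = 0 := by omega
      have hstep : oec_loop (k + 1) ((k + 1 : Nat) : Int) l0 l1
          = oec_loop k ((k : Int)) (l0 + ((k + 1 : Nat) : Int)) l1 := by
        have hz : ¬((k : Int) + 1 = 0) := by omega
        have hd : (2 : Int) ∣ (k : Int) + 1 := ⟨(b : Int), by omega⟩
        simp [oec_loop, hne, hmod, hm, hsub, hz, hd]
      rw [hstep, ih]
      have h1 : (k / 2 : Nat) = b - 1 := by omega
      have h2 : ((k + 1) / 2 : Nat) = b := by omega
      simp only [h1, h2]
      have h3 : (k - (b - 1) : Nat) = b := by omega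
      have h4 : (k + 1 - b : Nat) = b := by omega
      simp only [h3, h4, List.cons.injEq, and_true]
      have hcast : ((b - 1 : Nat) : Int) = (b : Int) - 1 := by omega
      rw [hcast]
      have hk : ((k : Nat) : Int) = 2 * (b : Int) - 1 := by omega
      push_cast
      rw [hk]; ring
    · obtain ⟨b, hb⟩ := ho
      have hm : (k + 1) % 2 = 1 := by omega
      have hstep : oec_loop (k + 1) ((k + 1 : Nat) : Int) l0 l1
          = oec_loop k ((k : Int)) l0 (l1 + ((k + 1 : Nat) : Int)) := by
        have hz : ¬((k : Int) + 1 = 0) := by omega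
        have hd : ¬((2 : Int) ∣ (k : Int) + 1) := by omega
        simp [oec_loop, hne, hmod, hm, hsub, hz, hd]
      rw [hstep, ih]
      have h1 : (k / 2 : Nat) = b := by omega
      have h2 : ((k + 1) / 2 : Nat) = b := by omega
      simp only [h1, h2]
      have h3 : (k - b : Nat) = b := by omega
      have h4 : (k + 1 - b : Nat) = b + 1 := by omega
      have hk : ((k : Nat) : Int) = 2 * (b : Int) := by omega
      simp only [h3, h4, List.cons.injEq, true_and, and_true]
      push_cast
      rw [hk]
      ring

-- ===== VERDICT (by name: the statement is the Claim_ definition above) =====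
theorem odd_even_counter_spec : Claim_equal_odd_even_counter := by
  intro n _ hpre
  unfold Spec_odd_even_counter odd_even_counter odd_even_counter_alt
  have hn : ((n.toNat : Nat) : Int) = n := Int.toNat_of_nonneg hpre
  rw [← hn, Int.toNat_natCast]
  rw [oec_loop_eq]
  have hfd : PySem.Int.floordiv ((n.toNat : Nat) : Int) 2 = ((n.toNat / 2 : Nat) : Int) := by
    exact_mod_cast PySem.Int.floordiv_natCast n.toNat 2
  simp only [hfd]
  have hs : ((n.toNat - n.toNat / 2 : Nat) : Int) = ((n.toNat : Nat) : Int) - ((n.toNat / 2 : Nat) : Int) := by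
    omega
  simp [hs]
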